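-- pv_equiv track=rewrite | github.com/DYCI2/dyci2-multi | multi-level/gram_ind.py | groupSymb
-- ===== SOURCE A (Python) =====
-- def groupSymb(chord_list, beg, end):
-- 	to_remove = []
-- 	i = 0
-- 	while i < len(chord_list)-1:
-- 		if chord_list[i] == beg and chord_list[i+1] == end:
-- 			chord_list[i] = beg + "_" + end
-- 			to_remove.insert(0,i+1)
-- 			i = i+2
-- 		else:
-- 			i = i+1
-- 	for elem in to_remove:
-- 		chord_list.pop(elem)
-- 	return chord_list
-- ===== SOURCE B (Python) =====
-- def groupSymb(chord_list, beg, end):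
--     # Single forward pass building a fresh output list; unlike A,
--     # the input list is NOT mutated (return-value equivalence only).
--     merged = beg + "_" + end
--     out = []
--     i = 0
--     n = len(chord_list)
--     while i < n:
--         if i + 1 < n and chord_list[i] == beg and chord_list[i + 1] == end:
--             out.append(merged)
--             i += 2
--         else:
--             out.append(chord_list[i])
--             i += 1
--     return out
-- ===== Notes on version B (the rewrite author's own statement) =====
-- stated objective: simpler
-- what changed: Instead of rewriting the list in place while collecting removal indices and then popping each of them, B makes one forward pass that appends either the merged token (consuming two elements) or the current element to a fresh output list; B does not mutate its argument.
import Mathlib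
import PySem

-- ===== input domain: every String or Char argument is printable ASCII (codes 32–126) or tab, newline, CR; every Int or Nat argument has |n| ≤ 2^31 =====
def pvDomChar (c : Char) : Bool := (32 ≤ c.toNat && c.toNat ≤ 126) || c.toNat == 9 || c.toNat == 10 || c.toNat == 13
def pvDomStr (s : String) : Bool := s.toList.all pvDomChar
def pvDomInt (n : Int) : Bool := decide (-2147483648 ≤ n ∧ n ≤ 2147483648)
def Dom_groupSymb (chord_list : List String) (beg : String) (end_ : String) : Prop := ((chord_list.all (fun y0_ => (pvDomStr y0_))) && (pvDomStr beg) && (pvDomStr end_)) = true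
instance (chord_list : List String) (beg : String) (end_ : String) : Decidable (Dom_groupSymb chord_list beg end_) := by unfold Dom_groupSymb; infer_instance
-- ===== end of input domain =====

-- B replaces A's in-place merge-then-pop by one forward pass building a new list;
-- A mutates its argument, B does not — the equivalence proved is about the RETURN value only.

-- ===== PORT A =====
-- the while loop: state (chord_list, to_remove, i); to_remove collects indices, front-first
def groupSymbLoop (cl : List String) (to_remove : List Nat) (i : Nat) (beg end_ : String) :
    List String × List Nat :=
  if _h : i < cl.length - 1 then
    -- indices i and i+1 are in range here, so pyGetD with a default is exact
    if PySem.List.pyGetD cl (i : Int) "" = beg ∧ PySem.List.pyGetD cl ((i : Int) + 1) "" = end_ then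
      groupSymbLoop (cl.set i (beg ++ "_" ++ end_)) ((i + 1) :: to_remove) (i + 2) beg end_
    else
      groupSymbLoop cl to_remove (i + 1) beg end_
  else (cl, to_remove)
termination_by cl.length - i
decreasing_by
  · simp only [List.length_set]; omega
  · omega

def groupSymb (chord_list : List String) (beg : String) (end_ : String) : List String :=
  let st := groupSymbLoop chord_list [] 0 beg end_
  -- for elem in to_remove: chord_list.pop(elem)   (every recorded index is in range)
  st.2.foldl (fun (cl : List String) (e : Nat) =>
      match PySem.List.pop? cl (e : Int) with
      | some r => r.2
      | none => cl) st.1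

-- ===== PORT B =====
-- the while loop of Source B: index i, accumulator out
def groupSymbAltLoop (cl : List String) (beg end_ merged : String) (out : List String) (i : Nat) :
    List String :=
  if _h : i < cl.length then
    if i + 1 < cl.length ∧ PySem.List.pyGetD cl (i : Int) "" = beg
        ∧ PySem.List.pyGetD cl ((i : Int) + 1) "" = end_ then
      groupSymbAltLoop cl beg end_ merged (out ++ [merged]) (i + 2)
    else
      groupSymbAltLoop cl beg end_ merged (out ++ [PySem.List.pyGetD cl (i : Int) ""]) (i + 1)
  else out
termination_by cl.length - i

def groupSymb_alt (chord_list : List String) (beg : String) (end_ : String) : List String :=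
  groupSymbAltLoop chord_list beg end_ (beg ++ "_" ++ end_) [] 0

-- ===== PRECONDITION & SPEC =====
def Spec_groupSymb (chord_list : List String) (beg : String) (end_ : String) (out : List String) : Prop := out = groupSymb_alt chord_list beg end_
instance (chord_list : List String) (beg : String) (end_ : String) (out : List String) : Decidable (Spec_groupSymb chord_list beg end_ out) := by unfold Spec_groupSymb; infer_instance

-- ===== CLAIM (what is proved, stated in full; the proofs are below) =====
def Claim_equal_groupSymb : Prop := ∀ (chord_list : List String) (beg : String) (end_ : String), Dom_groupSymb chord_list beg end_ → Spec_groupSymb chord_list beg end_ (groupSymb chord_list beg end_)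

-- ===== LEMMAS AND PROOFS =====

-- reference function: leftmost greedy non-overlapping merge, structural on the list
def mergeRef (beg end_ : String) : List String → List String
  | a :: b :: rest =>
      if a = beg ∧ b = end_ then (beg ++ "_" ++ end_) :: mergeRef beg end_ rest
      else a :: mergeRef beg end_ (b :: rest)
  | l => l

-- applying A's pop loop
def popAll (cl : List String) (tr : List Nat) : List String :=
  tr.foldl (fun (cl : List String) (e : Nat) =>
      match PySem.List.pop? cl (e : Int) with
      | some r => r.2
      | none => cl) cl

theorem popAll_nil (cl : List String) : popAll cl [] = cl := rfl

theorem popAll_cons (cl : List String) (e : Nat) (tr : List Nat) (h : e < cl.length) :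
    popAll cl (e :: tr) = popAll (cl.eraseIdx e) tr := by
  simp only [popAll, List.foldl_cons, PySem.List.pop?_natCast cl e h]

-- pops with strictly descending in-range indices only touch the prefix
theorem popAll_append (tr : List Nat) (xs ys : List String)
    (hd : tr.Pairwise (· > ·)) (hb : ∀ e ∈ tr, e < xs.length) :
    popAll (xs ++ ys) tr = popAll xs tr ++ ys := by
  induction tr generalizing xs with
  | nil => simp [popAll_nil]
  | cons e tr ih =>
      have he : e < xs.length := hb e (by simp)
      have h1 : e < (xs ++ ys).length := by simp; omega
      rw [popAll_cons _ _ _ h1, popAll_cons _ _ _ he, List.eraseIdx_append_of_lt_length he]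
      exact ih _ (List.Pairwise.of_cons hd)
        (fun x hx => by
          have hxe : e > x := (List.pairwise_cons.mp hd).1 x hx
          have := hb x (by simp [hx])
          have : (xs.eraseIdx e).length = xs.length - 1 := by
            rw [List.length_eraseIdx_of_lt he]
          omega)

theorem mergeRef_singleton (beg end_ : String) (a : String) :
    mergeRef beg end_ [a] = [a] := rfl

-- index helpers: pyGetD with an in-range natural index
theorem pyGetD_at (cl : List String) (i : Nat) (h : i < cl.length) :
    PySem.List.pyGetD cl (i : Int) "" = cl[i] := by
  simp [PySem.List.pyGetD_natCast, List.getD, List.getElem?_eq_getElem h]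

theorem pyGetD_at1 (cl : List String) (i : Nat) (h : i + 1 < cl.length) :
    PySem.List.pyGetD cl ((i : Int) + 1) "" = cl[i+1] := by
  have hcast : ((i : Int) + 1) = (((i + 1 : Nat)) : Int) := by push_cast; ring
  rw [hcast, pyGetD_at cl (i+1) h]

theorem drop_two (cl : List String) (i : Nat) (h : i + 1 < cl.length) :
    cl.drop i = cl[i]'(by omega) :: cl[i+1] :: cl.drop (i + 2) := by
  rw [List.drop_eq_getElem_cons (by omega : i < cl.length)]
  congr 1
  rw [List.drop_eq_getElem_cons h]

-- main invariant for A's while loop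
theorem groupSymbLoop_popAll (beg end_ : String) :
    ∀ (cl : List String) (tr : List Nat) (i : Nat),
    tr.Pairwise (· > ·) → (∀ e ∈ tr, e < i) →
    popAll (groupSymbLoop cl tr i beg end_).1 (groupSymbLoop cl tr i beg end_).2
      = popAll (cl.take i) tr ++ mergeRef beg end_ (cl.drop i) := by
  intro cl tr i
  induction cl, tr, i using groupSymbLoop.induct (beg := beg) (end_ := end_) with
  | case1 cl tr i h hc ih =>
      intro hp hb
      have hi1 : i + 1 < cl.length := by omega
      rw [groupSymbLoop]
      simp only [dif_pos h, if_pos hc]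
      rw [ih (List.pairwise_cons.mpr ⟨fun e he => by have := hb e he; omega, hp⟩)
            (fun e he => by rcases List.mem_cons.mp he with h' | h'
                            · omega
                            · exact Nat.lt_of_lt_of_le (hb e h') (by omega))]
      -- take (i+2) of the set list splits as take i ++ [merged, cl[i+1]]
      have hset : (cl.set i (beg ++ "_" ++ end_)).take (i + 2)
          = cl.take i ++ [beg ++ "_" ++ end_, cl[i+1]'hi1] := by
        apply List.ext_getElem
        · simp [List.length_set]; omega
        · intro k hk hk'
          simp only [List.length_take, List.length_set] at hk
          by_cases h1 : k < i
          · simp [List.getElem_take, List.getElem_append, List.length_take,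
              h1, Nat.ne_of_gt h1]
            omega
          · have hki : k = i ∨ k = i + 1 := by omega
            rcases hki with rfl | rfl
            · simp [List.getElem_take, List.length_take,
                Nat.min_eq_left (le_of_lt (by omega : k < cl.length))]
            · simp [List.getElem_take, List.length_take,
                Nat.min_eq_left (le_of_lt (by omega : i < cl.length))]
      have hdropset : (cl.set i (beg ++ "_" ++ end_)).drop (i + 2) = cl.drop (i + 2) := by
        exact List.drop_set_of_lt (by omega)
      rw [hset, hdropset]
      have htk : (cl.take i).length = i := by simp; omega
      have hpop1 : popAll (cl.take i ++ [beg ++ "_" ++ end_, cl[i+1]'hi1]) ((i + 1) :: tr)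
          = popAll (cl.take i ++ [beg ++ "_" ++ end_]) tr := by
        rw [popAll_cons _ _ _ (by simp [htk])]
        congr 1
        have hsplit : (cl.take i ++ [beg ++ "_" ++ end_, cl[i+1]'hi1])
            = (cl.take i ++ [beg ++ "_" ++ end_]) ++ [cl[i+1]'hi1] := by simp
        rw [hsplit, List.eraseIdx_append_of_length_le (by simp [htk])]
        simp [htk]
      rw [hpop1, popAll_append tr _ _ hp (fun e he => by rw [htk]; exact hb e he)]
      have hc' : cl[i]'(by omega) = beg ∧ cl[i+1]'hi1 = end_ := by
        rwa [pyGetD_at cl i (by omega), pyGetD_at1 cl i hi1] at hc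
      rw [drop_two cl i hi1, mergeRef, if_pos hc']
      simp
  | case2 cl tr i h hc ih =>
      intro hp hb
      have hi1 : i + 1 < cl.length := by omega
      rw [groupSymbLoop]
      simp only [dif_pos h, if_neg hc]
      rw [ih hp (fun e he => Nat.lt_of_lt_of_le (hb e he) (by omega))]
      have htk : (cl.take i).length = i := by simp; omega
      have htake : cl.take (i + 1) = cl.take i ++ [cl[i]'(by omega)] := by
        rw [List.take_add_one]
        simp [List.getElem?_eq_getElem (by omega : i < cl.length)]
      rw [htake, popAll_append tr _ _ hp (fun e he => by rw [htk]; exact hb e he)]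
      have hc' : ¬ (cl[i]'(by omega) = beg ∧ cl[i+1]'hi1 = end_) := by
        rwa [pyGetD_at cl i (by omega), pyGetD_at1 cl i hi1] at hc
      rw [drop_two cl i hi1, mergeRef, if_neg hc', List.drop_eq_getElem_cons hi1]
      simp
  | case3 cl tr i h =>
      intro hp hb
      rw [groupSymbLoop]
      simp only [dif_neg h]
      by_cases hlen : i ≥ cl.length
      · have h1 : cl.take i = cl := List.take_of_length_le hlen
        have h2 : cl.drop i = [] := List.drop_eq_nil_of_le hlen
        simp [h1, h2, mergeRef]
      · -- i = cl.length - 1 : exactly one element remains, kept as is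
        have hdrop : cl.drop i = [cl[i]'(by omega)] := by
          rw [List.drop_eq_getElem_cons (by omega)]
          simp [List.drop_eq_nil_of_le (by omega : cl.length ≤ i + 1)]
        have htake : cl = cl.take i ++ [cl[i]'(by omega)] := by
          conv_lhs => rw [← List.take_append_drop i cl]
          rw [hdrop]
        rw [hdrop, mergeRef_singleton]
        conv_lhs => rw [htake]
        exact popAll_append tr _ _ hp
          (fun e he => by have := hb e he; simp; omega)

-- B's loop computes out ++ mergeRef (drop i)
theorem groupSymbAltLoop_eq (cl : List String) (beg end_ : String) :
    ∀ (out : List String) (i : Nat),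
    groupSymbAltLoop cl beg end_ (beg ++ "_" ++ end_) out i
      = out ++ mergeRef beg end_ (cl.drop i) := by
  intro out i
  induction out, i using groupSymbAltLoop.induct (cl := cl) (beg := beg) (end_ := end_)
      (merged := beg ++ "_" ++ end_) with
  | case1 out i h hc ih =>
      obtain ⟨h1, ha, hb⟩ := hc
      rw [groupSymbAltLoop]
      simp only [dif_pos h, if_pos (⟨h1, ha, hb⟩ : _ ∧ _ ∧ _)]
      rw [ih, drop_two cl i h1, mergeRef,
        if_pos ⟨by rw [← pyGetD_at cl i (by omega)]; exact ha,
                by rw [← pyGetD_at1 cl i h1]; exact hb⟩]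
      simp
  | case2 out i h hc ih =>
      rw [groupSymbAltLoop]
      simp only [dif_pos h, if_neg hc]
      rw [ih]
      by_cases h1 : i + 1 < cl.length
      · have hc' : ¬ (cl[i]'h = beg ∧ cl[i+1]'h1 = end_) := by
          intro hcc
          exact hc ⟨h1, by rw [pyGetD_at cl i h]; exact hcc.1,
                        by rw [pyGetD_at1 cl i h1]; exact hcc.2⟩
        rw [drop_two cl i h1, mergeRef, if_neg hc', pyGetD_at cl i h,
          List.drop_eq_getElem_cons h1]
        simp
      · have hdrop : cl.drop i = [cl[i]'h] := by
          rw [List.drop_eq_getElem_cons h]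
          simp [List.drop_eq_nil_of_le (by omega : cl.length ≤ i + 1)]
        rw [hdrop, mergeRef_singleton, pyGetD_at cl i h,
          List.drop_eq_nil_of_le (by omega : cl.length ≤ i + 1)]
        simp [mergeRef]
  | case3 out i h =>
      rw [groupSymbAltLoop]
      simp only [dif_neg h]
      rw [List.drop_eq_nil_of_le (by omega)]
      simp [mergeRef]

-- ===== VERDICT (by name: the statement is the Claim_ definition above) =====
theorem groupSymb_spec : Claim_equal_groupSymb := by
  intro cl beg end_ _
  unfold Spec_groupSymb groupSymb groupSymb_alt
  have hA := groupSymbLoop_popAll beg end_ cl [] 0 (by simp) (by simp)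
  have hB := groupSymbAltLoop_eq cl beg end_ [] 0
  simp only [List.take_zero, List.drop_zero, popAll_nil, List.nil_append] at hA hB
  exact hA.trans hB.symm
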